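-- pv_equiv track=rewrite | github.com/KatrinKroin/DES-3Loop-Attack | src/General_functions.py | binnumgenerator
-- ===== SOURCE A (Python) =====
-- def binnumgenerator(word):
--     MaxSizeBin=word.count('x');
--     for Number in range(0,2**MaxSizeBin):
--         Full = list(word)
--         BinaryNumber="{0:0{Fill}b}\n".format(Number,Fill=MaxSizeBin);
--         BinaryIndex = 0
--
--         for Index in range(len(Full)):
--             if Full[Index] == 'x':
--                 Full[Index] = BinaryNumber[BinaryIndex];
--                 BinaryIndex = BinaryIndex + 1
--
--         yield ''.join(Full)
-- ===== SOURCE B (Python) =====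
-- def binnumgenerator(word):
--     results = ['']
--     for ch in reversed(word):
--         if ch == 'x':
--             results = ['0' + s for s in results] + ['1' + s for s in results]
--         else:
--             results = [ch + s for s in results]
--     yield from results
-- ===== Notes on version B (the rewrite author's own statement) =====
-- stated objective: simpler
-- what changed: B replaces A's integer counter + binary-format-string + per-output full index scan by a single right-to-left pass over the word that doubles the result list at each placeholder character (zero-branch expansions before one-branch expansions), yielding the same strings in the same binary-counting order.
import Mathlib
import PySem

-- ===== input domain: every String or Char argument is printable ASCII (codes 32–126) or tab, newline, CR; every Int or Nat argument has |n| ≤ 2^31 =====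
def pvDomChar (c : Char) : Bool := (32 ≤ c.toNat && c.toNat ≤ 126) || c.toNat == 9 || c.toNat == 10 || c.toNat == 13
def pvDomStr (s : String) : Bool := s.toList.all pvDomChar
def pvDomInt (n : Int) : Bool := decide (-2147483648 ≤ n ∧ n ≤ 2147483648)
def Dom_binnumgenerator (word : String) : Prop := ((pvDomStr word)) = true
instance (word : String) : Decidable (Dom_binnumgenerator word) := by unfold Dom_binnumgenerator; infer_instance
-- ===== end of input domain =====

-- B replaces A's integer-counter + binary-format-string + full index scan per output by one
-- right-to-left pass doubling the result list at each 'x'; same strings, same order (objective: simpler).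

-- ===== PORT A =====
-- binary digits (most significant first) of a number, as Python's 'b' format produces them ([] for 0)
def pvBinDigits : Nat → List Char
  | 0 => []
  | n + 1 => pvBinDigits ((n + 1) / 2) ++ [if (n + 1) % 2 = 1 then '1' else '0']
decreasing_by exact Nat.div_lt_self (Nat.succ_pos n) (by norm_num)

-- "{0:0{Fill}b}\n".format(Number, Fill=fill): hand port (PySem has no format primitive);
-- exact for Number ≥ 0, which range(0, 2**MaxSizeBin) guarantees
def pvFormatBin (n fill : Nat) : List Char :=
  let digits := if n = 0 then ['0'] else pvBinDigits n
  List.replicate (fill - digits.length) '0' ++ digits ++ ['\n']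

-- one step of A's inner 'for Index in range(len(Full))' loop, state = (Full, BinaryIndex);
-- BinaryNumber[BinaryIndex] is always in range in Python (never an IndexError), so getD's default is unreachable
def pvStepA (BinaryNumber : List Char) (st : List Char × Nat) (Index : Nat) : List Char × Nat :=
  if st.1.getD Index ' ' == 'x' then (st.1.set Index (BinaryNumber.getD st.2 ' '), st.2 + 1)
  else st

def binnumgenerator (word : String) : List String :=
  let MaxSizeBin := PySem.Str.count word "x"
  (PySem.List.pyRange 0 ((2 : Int) ^ MaxSizeBin) 1).map (fun Number =>
    let Full := word.toList
    -- Number comes from range(0, 2**MaxSizeBin), so Number ≥ 0 and .toNat is exact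
    let BinaryNumber := pvFormatBin Number.toNat MaxSizeBin
    let r := (List.range Full.length).foldl (pvStepA BinaryNumber) (Full, 0)
    String.mk r.1)

-- ===== PORT B =====
-- 'for ch in reversed(word): results = f(ch, results)' is a foldr over word's characters
def binnumgenerator_alt (word : String) : List String :=
  let results := word.toList.foldr
    (fun ch results =>
      if ch == 'x' then results.map ('0' :: ·) ++ results.map ('1' :: ·)
      else results.map (ch :: ·))
    ([[]] : List (List Char))
  results.map String.mk

-- ===== PRECONDITION & SPEC =====
def Spec_binnumgenerator (word : String) (out : List String) : Prop := out = binnumgenerator_alt word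
instance (word : String) (out : List String) : Decidable (Spec_binnumgenerator word out) := by unfold Spec_binnumgenerator; infer_instance

-- ===== CLAIM (what is proved, stated in full; the proofs are below) =====
def Claim_equal_binnumgenerator : Prop := ∀ (word : String), Dom_binnumgenerator word → Spec_binnumgenerator word (binnumgenerator word)

-- ===== LEMMAS AND PROOFS =====

-- the canonical replacement: substitute successive elements of bs for the 'x's of cs
def pvRepl : List Char → List Char → List Char
  | [], _ => []
  | c :: rest, bs =>
      if c == 'x' then bs.headD ' ' :: pvRepl rest bs.tail else c :: pvRepl rest bs

-- the k-bit binary representation of n (MSB first)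
def pvBits : Nat → Nat → List Char
  | 0, _ => []
  | k + 1, n => (if n < 2 ^ k then '0' else '1') :: pvBits k (n % 2 ^ k)

lemma pvCountGo (l : List Char) : ∀ (fuel acc : Nat), l.length ≤ fuel →
    PySem.Chars.count.go ['x'] fuel l acc = acc + l.count 'x' := by
  induction l with
  | nil =>
      intro fuel acc _
      cases fuel <;> simp [PySem.Chars.count.go]
  | cons c t ih =>
      intro fuel acc h
      cases fuel with
      | zero => simp at h
      | succ f =>
          simp only [List.length_cons, Nat.add_le_add_iff_right] at h
          by_cases hc : c = 'x'
          · subst hc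
            simp [PySem.Chars.count.go, List.isPrefixOf, ih f (acc + 1) h,
              List.count_cons]
            omega
          · simp [PySem.Chars.count.go, List.isPrefixOf, hc, ih f acc h,
              List.count_cons, Ne.symm hc]

lemma pvCountX (word : String) : PySem.Str.count word "x" = word.toList.count 'x' := by
  have h := pvCountGo word.toList word.toList.length 0 le_rfl
  rw [PySem.Str.count_eq]
  show PySem.Chars.count word.toList ['x'] = _
  rw [PySem.Chars.count]
  simpa using h

-- A's inner loop, characterised as the structural recursion pvRepl
lemma pvLoopA (bs : List Char) : ∀ (cs pre : List Char) (j : Nat),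
    ((List.range cs.length).map (· + pre.length)).foldl (pvStepA bs) (pre ++ cs, j)
    = (pre ++ pvRepl cs (bs.drop j), j + cs.count 'x') := by
  intro cs
  induction cs with
  | nil => intro pre j; simp [pvRepl]
  | cons c rest ih =>
      intro pre j
      rw [List.length_cons, List.range_succ_eq_map]
      simp only [List.map_cons, List.map_map, List.foldl_cons, Nat.zero_add]
      have hidx : (pre ++ c :: rest).getD pre.length ' ' = c := by
        rw [List.getD_eq_getElem?_getD, List.getElem?_append_right le_rfl]
        simp
      have hmaps : ∀ (v : Char),
          (List.map ((fun x => x + pre.length) ∘ Nat.succ) (List.range rest.length))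
          = List.map (· + (pre ++ [v]).length) (List.range rest.length) := by
        intro v
        apply List.map_congr_left
        intro i _
        simp [Function.comp, Nat.succ_eq_add_one]
        omega
      by_cases hc : c = 'x'
      · subst hc
        rw [show pvStepA bs (pre ++ 'x' :: rest, j) pre.length
              = ((pre ++ [bs.getD j ' ']) ++ rest, j + 1) by
            simp only [pvStepA, hidx]
            rw [if_pos (by decide)]
            rw [List.set_append_right _ _ le_rfl]
            simp]
        rw [hmaps (bs.getD j ' '), ih (pre ++ [bs.getD j ' ']) (j + 1)]
        have h1 : (bs.drop j).headD ' ' = bs.getD j ' ' := by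
          rw [List.headD_eq_head?_getD, List.head?_drop, List.getD_eq_getElem?_getD]
        have h2 : (bs.drop j).tail = bs.drop (j + 1) := by
          rw [List.tail_drop]
        simp only [pvRepl, if_pos (by decide : ('x' == 'x') = true), h1, h2,
          List.count_cons, List.append_assoc, List.singleton_append, Prod.mk.injEq]
        exact ⟨trivial, by omega⟩
      · rw [show pvStepA bs (pre ++ c :: rest, j) pre.length = (pre ++ c :: rest, j) by
            simp only [pvStepA, hidx]
            rw [if_neg (by simp [hc])]]
        have : pre ++ c :: rest = (pre ++ [c]) ++ rest := by simp
        rw [this, hmaps c, ih (pre ++ [c]) j]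
        simp only [pvRepl, if_neg (by simp [hc] : ¬ ((c == 'x') = true)),
          List.count_cons, List.append_assoc, List.singleton_append, Prod.mk.injEq]
        exact ⟨trivial, by simp [hc]⟩

-- pvRepl reads only the first (count of 'x') elements of bs
lemma pvReplCongr : ∀ (cs bs bs' : List Char),
    bs.take (cs.count 'x') = bs'.take (cs.count 'x') → pvRepl cs bs = pvRepl cs bs' := by
  intro cs
  induction cs with
  | nil => intro bs bs' _; rfl
  | cons c rest ih =>
      intro bs bs' h
      by_cases hc : c = 'x'
      · subst hc
        rw [List.count_cons_self] at h
        match bs, bs' with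
        | [], [] => rfl
        | [], b' :: t' => simp at h
        | b :: t, [] => simp at h
        | b :: t, b' :: t' =>
            simp only [List.take_succ_cons, List.cons.injEq] at h
            simp only [pvRepl, if_pos (by decide : ('x' == 'x') = true),
              List.headD_cons, List.tail_cons, h.1]
            rw [ih t t' h.2]
      · rw [List.count_cons_of_ne (by simp [hc])] at h
        simp only [pvRepl, if_neg (by simp [hc] : ¬ ((c == 'x') = true))]
        rw [ih bs bs' h]

lemma pvBits_zero (k : Nat) : pvBits k 0 = List.replicate k '0' := by
  induction k with
  | zero => rfl
  | succ k ih =>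
      simp [pvBits, Nat.two_pow_pos, ih, List.replicate_succ]

lemma pvBits_length : ∀ (k n : Nat), (pvBits k n).length = k := by
  intro k
  induction k with
  | zero => intro n; rfl
  | succ k ih => intro n; simp [pvBits, ih]

lemma pvBits_lsb : ∀ (k n : Nat), n < 2 ^ (k + 1) →
    pvBits (k + 1) n = pvBits k (n / 2) ++ [if n % 2 = 1 then '1' else '0'] := by
  intro k
  induction k with
  | zero =>
      intro n h
      interval_cases n <;> decide
  | succ k ih =>
      intro n h
      have h1 : n % 2 ^ (k + 1) < 2 ^ (k + 1) := Nat.mod_lt _ (Nat.two_pow_pos _)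
      have e1 : n % 2 ^ (k + 1) / 2 = n / 2 % 2 ^ k := by
        rw [show (2 : Nat) ^ (k + 1) = 2 * 2 ^ k by ring]
        rw [Nat.mod_mul_right_div_self]
      have e2 : n % 2 ^ (k + 1) % 2 = n % 2 := Nat.mod_mod_of_dvd n ⟨2 ^ k, by ring⟩
      have e3 : n < 2 ^ (k + 1) ↔ n / 2 < 2 ^ k := by
        rw [Nat.div_lt_iff_lt_mul (by norm_num)]
        constructor <;> intro hx
        · rw [show (2:Nat) ^ k * 2 = 2 ^ (k+1) by ring]; omega
        · rw [show (2:Nat) ^ (k+1) = 2 ^ k * 2 by ring]; omega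
      show (if n < 2 ^ (k + 1) then '0' else '1') :: pvBits (k + 1) (n % 2 ^ (k + 1))
          = ((if n / 2 < 2 ^ k then '0' else '1') :: pvBits k (n / 2 % 2 ^ k))
            ++ [if n % 2 = 1 then '1' else '0']
      rw [ih (n % 2 ^ (k + 1)) h1, e1, e2, List.cons_append]
      congr 1
      by_cases hx : n / 2 < 2 ^ k
      · rw [if_pos hx, if_pos (e3.mpr hx)]
      · rw [if_neg hx, if_neg (fun hy => hx (e3.mp hy))]

-- Python's zero-padded binary digits agree with pvBits
lemma pvPad : ∀ (k n : Nat), n < 2 ^ (k + 1) →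
    List.replicate ((k + 1) - (if n = 0 then ['0'] else pvBinDigits n).length) '0'
      ++ (if n = 0 then ['0'] else pvBinDigits n) = pvBits (k + 1) n := by
  intro k
  induction k with
  | zero =>
      intro n h
      interval_cases n <;> simp [pvBinDigits, pvBits]
  | succ k ih =>
      intro n h
      rcases Nat.lt_or_ge n 2 with h2 | h2
      · interval_cases n
        · simp [pvBits_zero, List.replicate_succ']
        · rw [pvBits_lsb (k + 1) 1 h]
          simp [pvBinDigits, pvBits_zero, List.replicate_succ']
      · have hn0 : n ≠ 0 := by omega
        have hd0 : n / 2 ≠ 0 := by omega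
        have hdig : pvBinDigits n = pvBinDigits (n / 2) ++ [if n % 2 = 1 then '1' else '0'] := by
          match n, h2 with
          | m + 1, _ => rw [pvBinDigits]
        have hdiv : n / 2 < 2 ^ (k + 1) := by
          rw [Nat.div_lt_iff_lt_mul (by norm_num)]
          calc n < 2 ^ (k + 1 + 1) := h
            _ = 2 ^ (k + 1) * 2 := by ring
        have := ih (n / 2) hdiv
        rw [if_neg hd0] at this
        rw [pvBits_lsb (k + 1) n h, if_neg hn0, hdig, ← this]
        rw [List.length_append, List.length_singleton]
        rw [show k + 1 + 1 - ((pvBinDigits (n / 2)).length + 1)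
              = k + 1 - (pvBinDigits (n / 2)).length by omega]
        simp only [← List.append_assoc]

lemma pvFormatTake (k n : Nat) (h : n < 2 ^ (k + 1)) :
    (pvFormatBin n (k + 1)).take (k + 1) = pvBits (k + 1) n := by
  unfold pvFormatBin
  have hp := pvPad k n h
  have hlen : (List.replicate ((k + 1) - (if n = 0 then ['0'] else pvBinDigits n).length) '0'
      ++ (if n = 0 then ['0'] else pvBinDigits n)).length = k + 1 := by
    rw [hp, pvBits_length]
  simp only [← List.append_assoc]
  rw [List.take_append_of_le_length (le_of_eq hlen.symm), hp,
    List.take_of_length_le (by rw [pvBits_length])]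

-- the core equivalence: binary-counting enumeration = B's doubling fold
lemma pvMain : ∀ (cs : List Char),
    (List.range (2 ^ cs.count 'x')).map (fun n => pvRepl cs (pvBits (cs.count 'x') n))
    = cs.foldr
        (fun ch results =>
          if ch == 'x' then results.map ('0' :: ·) ++ results.map ('1' :: ·)
          else results.map (ch :: ·))
        [[]] := by
  intro cs
  induction cs with
  | nil => simp [pvRepl]
  | cons c rest ih =>
      by_cases hc : c = 'x'
      · subst hc
        rw [List.count_cons_self, List.foldr_cons, if_pos (by decide)]
        rw [show (2 : Nat) ^ (rest.count 'x' + 1) = 2 ^ rest.count 'x' + 2 ^ rest.count 'x' by ring]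
        rw [List.range_add, List.map_append, List.map_map]
        congr 1
        · rw [← ih, List.map_map]
          apply List.map_congr_left
          intro n hn
          rw [List.mem_range] at hn
          simp only [Function.comp]
          show pvRepl ('x' :: rest) ((if n < 2 ^ rest.count 'x' then '0' else '1')
            :: pvBits (rest.count 'x') (n % 2 ^ rest.count 'x')) = _
          rw [if_pos hn, Nat.mod_eq_of_lt hn]
          simp [pvRepl]
        · rw [← ih, List.map_map]
          apply List.map_congr_left
          intro n hn
          rw [List.mem_range] at hn
          simp only [Function.comp]
          show pvRepl ('x' :: rest)
              ((if 2 ^ rest.count 'x' + n < 2 ^ rest.count 'x' then '0' else '1')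
                :: pvBits (rest.count 'x') ((2 ^ rest.count 'x' + n) % 2 ^ rest.count 'x')) = _
          rw [if_neg (by omega), Nat.add_mod_left, Nat.mod_eq_of_lt hn]
          simp [pvRepl]
      · rw [List.count_cons_of_ne (by simp [hc]), List.foldr_cons,
          if_neg (by simp [hc] : ¬ ((c == 'x') = true))]
        rw [← ih, List.map_map]
        apply List.map_congr_left
        intro n _
        simp only [Function.comp]
        simp [pvRepl, hc]

-- replace the formatted string by pvBits inside pvRepl
lemma pvFormatRepl (cs : List Char) (n : Nat) (hn : n < 2 ^ cs.count 'x') :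
    pvRepl cs (pvFormatBin n (cs.count 'x')) = pvRepl cs (pvBits (cs.count 'x') n) := by
  apply pvReplCongr
  cases hk : cs.count 'x' with
  | zero => simp
  | succ k =>
      rw [hk] at hn
      rw [pvFormatTake k n hn, List.take_of_length_le (by rw [pvBits_length])]

-- ===== VERDICT (by name: the statement is the Claim_ definition above) =====
theorem binnumgenerator_spec : Claim_equal_binnumgenerator := by
  intro word _
  unfold Spec_binnumgenerator binnumgenerator binnumgenerator_alt
  simp only [pvCountX]
  rw [PySem.List.pyRange_one, List.map_map]
  have hto : (((2 : Int) ^ word.toList.count 'x') - 0).toNat = 2 ^ word.toList.count 'x' := by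
    rw [sub_zero, show ((2 : Int)) ^ word.toList.count 'x'
        = ((2 ^ word.toList.count 'x' : Nat) : Int) by push_cast; ring]
    exact Int.toNat_natCast _
  rw [hto, ← pvMain, List.map_map]
  apply List.map_congr_left
  intro n hn
  rw [List.mem_range] at hn
  simp only [Function.comp_apply]
  have hNat : ((0 : Int) + (n : Int)).toNat = n := by simp
  rw [hNat]
  have hloop := pvLoopA (pvFormatBin n (word.toList.count 'x')) word.toList [] 0
  simp only [List.nil_append, List.length_nil, Nat.add_zero, List.drop_zero,
    List.map_id'] at hloop
  have hloop1 : (List.foldl (pvStepA (pvFormatBin n (word.toList.count 'x')))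
      (word.toList, 0) (List.range word.toList.length)).1
      = pvRepl word.toList (pvFormatBin n (word.toList.count 'x')) := by rw [hloop]
  rw [hloop1, pvFormatRepl word.toList n hn]
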